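-- pv_equiv track=rewrite | github.com/sapsey19/AdvPy-sapsey | Kattis/2.6/Planetaris.py | answer
-- ===== SOURCE A (Python) =====
-- def answer(n, a, ships):
--     ships.sort()
--     counter = 0
--     # for i in range (0, n):
--     #     if ships[i] < a:
--     #         counter += 1
--     #         a -= ships[i] + 1
--     # while i < n:
--     #     if ships[i] < a:
--     #         counter += 1
--     #         a -= ships[i] + 1
--     #     i += 1
--     for x in ships:
--         if x < a:
--             counter += 1
--             a = a - (x + 1)
--     return counter
-- ===== SOURCE B (Python) =====
-- def answer(n, a, ships):
--     ships.sort()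
--     # stage 1: prefix maxima of f(i) = ships[0]+...+ships[i] + i (no reference to a here)
--     m = []
--     s = 0
--     best = None
--     for i, x in enumerate(ships):
--         s += x
--         f = s + i
--         if best is None or f > best:
--             best = f
--         m.append(best)
--     # stage 2: m is nondecreasing; the first index with m[i] >= a is the count of defeatable ships
--     lo, hi = 0, len(ships)
--     while lo < hi:
--         mid = (lo + hi) // 2
--         if m[mid] >= a:
--             hi = mid
--         else:
--             lo = mid + 1
--     return lo
-- ===== Notes on version B (the rewrite author's own statement) =====
-- stated objective: alternative
-- what changed: B replaces A's early-exit simulation of the depleting army by two staged passes plus a search: it first builds a prefix-maximum array of f(i)=prefix_sum+i over the sorted ships (never consulting a), then binary-searches that monotone array for the first entry >= a, which is the count.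
import Mathlib
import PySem

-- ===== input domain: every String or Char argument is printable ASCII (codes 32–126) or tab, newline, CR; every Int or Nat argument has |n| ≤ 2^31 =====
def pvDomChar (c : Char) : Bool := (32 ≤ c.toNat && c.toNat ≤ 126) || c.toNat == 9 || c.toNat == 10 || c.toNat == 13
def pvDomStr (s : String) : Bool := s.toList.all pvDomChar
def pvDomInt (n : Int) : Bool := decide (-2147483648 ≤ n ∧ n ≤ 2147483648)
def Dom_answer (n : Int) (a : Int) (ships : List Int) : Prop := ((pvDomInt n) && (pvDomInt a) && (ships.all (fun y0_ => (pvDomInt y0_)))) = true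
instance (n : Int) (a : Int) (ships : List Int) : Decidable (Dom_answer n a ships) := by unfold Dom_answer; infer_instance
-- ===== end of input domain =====

-- B replaces A's early-exit army simulation by a staged prefix-maximum pass plus a binary
-- search; objective: alternative (same cost). Both A and B sort `ships` in place in Python
-- (same mutation); the equivalence proved here is about the return value.

-- ===== PORT A =====
-- A's for-loop carrying (counter, a)
def answer (n : Int) (a : Int) (ships : List Int) : Int :=
  ((PySem.List.sorted ships (fun x => x) false).foldl
    (fun st x => if x < st.2 then (st.1 + 1, st.2 - (x + 1)) else st) ((0 : Int), a)).1

-- ===== PORT B =====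
-- Source B stage 1: running prefix maxima of f = s + x + i, carrying (i, s, best)
def buildM (i : Int) (s : Int) (best : Option Int) : List Int → List Int
  | [] => []
  | x :: xs =>
      let f := s + x + i
      let b := match best with
        | none => f
        | some b0 => if f > b0 then f else b0
      b :: buildM (i + 1) (s + x) (some b) xs

-- Source B stage 2: the while-loop binary search; m[mid] is always in range (lo ≤ mid < hi ≤ len),
-- so the in-range read is ported with getD.
def bsearchGo (m : List Int) (a : Int) (lo : Int) (hi : Int) : Int :=
  if _h : lo < hi then
    if m.getD (PySem.Int.floordiv (lo + hi) 2).toNat 0 ≥ a then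
      bsearchGo m a lo (PySem.Int.floordiv (lo + hi) 2)
    else
      bsearchGo m a (PySem.Int.floordiv (lo + hi) 2 + 1) hi
  else lo
termination_by (hi - lo).toNat
decreasing_by
  all_goals
    (rw [PySem.Int.floordiv_eq_ediv_of_pos (a := lo + hi) (b := 2) (by norm_num)]; omega)

def answer_alt (n : Int) (a : Int) (ships : List Int) : Int :=
  bsearchGo (buildM 0 0 none (PySem.List.sorted ships (fun x => x) false)) a 0
    ((PySem.List.sorted ships (fun x => x) false).length : Int)

-- ===== PRECONDITION & SPEC =====
def Spec_answer (n : Int) (a : Int) (ships : List Int) (out : Int) : Prop := out = answer_alt n a ships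
instance (n : Int) (a : Int) (ships : List Int) (out : Int) : Decidable (Spec_answer n a ships out) := by unfold Spec_answer; infer_instance

-- ===== CLAIM (what is proved, stated in full; the proofs are below) =====
def Claim_equal_answer : Prop := ∀ (n : Int) (a : Int) (ships : List Int), Dom_answer n a ships → Spec_answer n a ships (answer n a ships)

-- ===== LEMMAS AND PROOFS =====

-- Proof-side spec: the first-crossing scan (first absolute index i with t + x + i ≥ a).
def scanCount (a : Int) (i : Int) (t : Int) : List Int → Int
  | [] => i
  | x :: xs => if t + x + i ≥ a then i else scanCount a (i + 1) (t + x) xs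

-- Once A fails to defeat a ship, its state never changes again (all remaining ships are ≥ the army).
theorem foldA_stall (xs : List Int) (c ar : Int) (h : ∀ y ∈ xs, ¬ y < ar) :
    xs.foldl (fun st x => if x < st.2 then (st.1 + 1, st.2 - (x + 1)) else st) (c, ar) = (c, ar) := by
  induction xs with
  | nil => rfl
  | cons x xs ih =>
    simp only [List.foldl_cons]
    rw [if_neg (h x (by simp))]
    exact ih (fun y hy => h y (by simp [hy]))

-- A's fold equals the first-crossing scan, on a ≤-sorted list.
theorem main_lemma (a : Int) : ∀ (xs : List Int), xs.Pairwise (· ≤ ·) → ∀ (c i t : Int),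
    (xs.foldl (fun st x => if x < st.2 then (st.1 + 1, st.2 - (x + 1)) else st) (c, a - t - i)).1
      = c + scanCount a i t xs - i := by
  intro xs
  induction xs with
  | nil => intro _ c i t; simp [scanCount]
  | cons x xs ih =>
    intro hp c i t
    rw [List.pairwise_cons] at hp
    simp only [List.foldl_cons, scanCount]
    by_cases hx : x < a - t - i
    · rw [if_pos hx, if_neg (by omega)]
      have : a - t - i - (x + 1) = a - (t + x) - (i + 1) := by ring
      rw [this, ih hp.2 (c + 1) (i + 1) (t + x)]
      omega
    · rw [if_neg hx, if_pos (by omega)]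
      rw [foldA_stall xs c (a - t - i) (fun y hy => by have := hp.1 y hy; omega)]
      omega

theorem scan_bounds (a : Int) : ∀ (xs : List Int) (i t : Int),
    i ≤ scanCount a i t xs ∧ scanCount a i t xs ≤ i + xs.length := by
  intro xs
  induction xs with
  | nil => intro i t; simp [scanCount]
  | cons x xs ih =>
    intro i t
    simp only [scanCount, List.length_cons]
    split
    · omega
    · have := ih (i + 1) (t + x); push_cast at *; omega

theorem buildM_length : ∀ (xs : List Int) (i s : Int) (best : Option Int),
    (buildM i s best xs).length = xs.length := by
  intro xs
  induction xs with
  | nil => intro i s best; rfl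
  | cons x xs ih => intro i s best; simp [buildM, ih]

-- Head of a prefix-max cons: the new maximum b, with its defining properties.
theorem buildM_head (i s x : Int) (xs : List Int) (best : Option Int) :
    ∃ b : Int, buildM i s best (x :: xs) = b :: buildM (i + 1) (s + x) (some b) xs ∧
      s + x + i ≤ b ∧ (∀ b0, best = some b0 → b0 ≤ b) ∧
      (b = s + x + i ∨ ∃ b0, best = some b0 ∧ b = b0) := by
  cases best with
  | none =>
    refine ⟨s + x + i, rfl, le_refl _, ?_, Or.inl rfl⟩
    intro b0 h; cases h
  | some b0 =>
    by_cases h : s + x + i > b0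
    · refine ⟨s + x + i, ?_, le_refl _, by intro b1 hb1; injection hb1 with hb1; omega,
        Or.inl rfl⟩
      simp only [buildM, if_pos h]
    · refine ⟨b0, ?_, by omega, by intro b1 hb1; injection hb1 with hb1; omega,
        Or.inr ⟨b0, rfl, rfl⟩⟩
      simp only [buildM, if_neg h]

-- every element of a prefix-max list seeded with best = some b is ≥ b
theorem buildM_ge : ∀ (xs : List Int) (i s b : Int),
    ∀ y ∈ buildM i s (some b) xs, b ≤ y := by
  intro xs
  induction xs with
  | nil => intro i s b y hy; simp [buildM] at hy
  | cons x xs ih =>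
    intro i s b y hy
    obtain ⟨b', hbm, _, hseed, _⟩ := buildM_head i s x xs (some b)
    rw [hbm, List.mem_cons] at hy
    have hbb' : b ≤ b' := hseed b rfl
    rcases hy with h | h
    · omega
    · have := ih (i + 1) (s + x) b' y h
      omega

theorem buildM_mono : ∀ (xs : List Int) (i s : Int) (best : Option Int) (j k : Nat),
    j ≤ k → k < xs.length →
    (buildM i s best xs).getD j 0 ≤ (buildM i s best xs).getD k 0 := by
  intro xs
  induction xs with
  | nil => intro i s best j k _ hk; simp at hk
  | cons x xs ih =>
    intro i s best j k hjk hk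
    obtain ⟨b, hbm, _, _, _⟩ := buildM_head i s x xs best
    rw [hbm]
    match j, k with
    | 0, 0 => exact le_refl _
    | 0, Nat.succ k' =>
      simp only [List.getD_cons_zero, List.getD_cons_succ]
      have hk' : k' < (buildM (i + 1) (s + x) (some b) xs).length := by
        rw [buildM_length]; simpa using hk
      rw [List.getD_eq_getElem _ _ hk']
      exact buildM_ge xs (i + 1) (s + x) b _ (List.getElem_mem hk')
    | Nat.succ j', Nat.succ k' =>
      simp only [List.getD_cons_succ]
      exact ih (i + 1) (s + x) (some b) j' k' (by omega) (by simpa using hk)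

-- Characterization of the prefix-max array against the scan: below the crossing every entry
-- is < a; at the crossing the entry is ≥ a.
theorem buildM_char (a : Int) : ∀ (xs : List Int) (i t : Int) (best : Option Int),
    (∀ b0, best = some b0 → b0 < a) →
    (∀ j : Nat, (i + j : Int) < scanCount a i t xs → (buildM i t best xs).getD j 0 < a) ∧
    (scanCount a i t xs < i + xs.length →
      (buildM i t best xs).getD (scanCount a i t xs - i).toNat 0 ≥ a) := by
  intro xs
  induction xs with
  | nil =>
    intro i t best _
    constructor
    · intro j hj; simp [scanCount] at hj; omega
    · intro h; simp [scanCount] at h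
  | cons x xs ih =>
    intro i t best hbest
    obtain ⟨b, hbm, hble, _, hbor⟩ := buildM_head i t x xs best
    have hbub : t + x + i < a → b < a := by
      intro hlt
      rcases hbor with h | ⟨b0, hb0, hbeq⟩
      · omega
      · rw [hbeq]; exact hbest b0 hb0
    by_cases hf : t + x + i ≥ a
    · constructor
      · intro j hj
        simp only [scanCount, if_pos hf] at hj
        omega
      · intro _
        simp only [scanCount, if_pos hf]
        rw [hbm]
        have h0 : (i - i).toNat = 0 := by omega
        rw [h0, List.getD_cons_zero]
        omega
    · have hba : b < a := hbub (by omega)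
      have hrec := ih (i + 1) (t + x) (some b) (by
        intro b0 hb0; injection hb0 with hb0; omega)
      have hlow := (scan_bounds a xs (i + 1) (t + x)).1
      constructor
      · intro j hj
        simp only [scanCount, if_neg hf] at hj ⊢
        rw [hbm]
        match j with
        | 0 => simpa using hba
        | Nat.succ j' =>
          simp only [List.getD_cons_succ]
          exact hrec.1 j' (by push_cast at hj; omega)
      · intro hlt
        simp only [scanCount, if_neg hf, List.length_cons] at hlt ⊢
        rw [hbm]
        have h1 : (scanCount a (i + 1) (t + x) xs - i).toNat
            = (scanCount a (i + 1) (t + x) xs - (i + 1)).toNat + 1 := by omega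
        rw [h1, List.getD_cons_succ]
        exact hrec.2 (by push_cast at hlt; omega)

-- Binary-search correctness against the crossing index r, via the iff characterization.
theorem bsearch_correct : ∀ (fuel : Nat) (m : List Int) (a lo hi r : Int),
    (hi - lo).toNat ≤ fuel → 0 ≤ lo → lo ≤ r → r ≤ hi → hi ≤ (m.length : Int) →
    (∀ j : Nat, j < m.length → ((m.getD j 0 ≥ a) ↔ r ≤ (j : Int))) →
    bsearchGo m a lo hi = r := by
  intro fuel
  induction fuel with
  | zero =>
    intro m a lo hi r hfuel _ h1 h2 _ _
    rw [bsearchGo, dif_neg (by omega)]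
    omega
  | succ fuel ih =>
    intro m a lo hi r hfuel h0 h1 h2 h3 hiff
    by_cases hlh : lo < hi
    · rw [bsearchGo, dif_pos hlh]
      have hmid : PySem.Int.floordiv (lo + hi) 2 = (lo + hi) / 2 :=
        PySem.Int.floordiv_eq_ediv_of_pos (by norm_num)
      have hmlo : lo ≤ PySem.Int.floordiv (lo + hi) 2 := by rw [hmid]; omega
      have hmhi : PySem.Int.floordiv (lo + hi) 2 < hi := by rw [hmid]; omega
      have hlen : (PySem.Int.floordiv (lo + hi) 2).toNat < m.length := by
        rw [hmid]; omega
      have hcast : ((PySem.Int.floordiv (lo + hi) 2).toNat : Int)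
          = PySem.Int.floordiv (lo + hi) 2 := by rw [hmid]; omega
      have hj := hiff (PySem.Int.floordiv (lo + hi) 2).toNat hlen
      rw [hcast] at hj
      by_cases hge : m.getD (PySem.Int.floordiv (lo + hi) 2).toNat 0 ≥ a
      · rw [if_pos hge]
        have hrm : r ≤ PySem.Int.floordiv (lo + hi) 2 := hj.mp hge
        exact ih m a lo _ r (by rw [hmid] at *; omega) h0 h1 hrm (by omega) hiff
      · rw [if_neg hge]
        have hrm : PySem.Int.floordiv (lo + hi) 2 < r := by
          by_contra hc
          exact hge (hj.mpr (by omega))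
        exact ih m a _ hi r (by rw [hmid] at *; omega) (by omega) (by omega) h2 h3 hiff
    · rw [bsearchGo, dif_neg hlh]
      omega

-- ===== VERDICT (by name: the statement is the Claim_ definition above) =====
theorem answer_spec : Claim_equal_answer := by
  intro n a ships _
  unfold Spec_answer answer answer_alt
  have hsorted : (PySem.List.sorted ships (fun x => x) false).Pairwise (· ≤ ·) := by
    simpa using PySem.List.sorted_pairwise ships (fun x => x)
  set ys := PySem.List.sorted ships (fun x => x) false with hys
  have hA := main_lemma a ys hsorted 0 0 0
  simp only [sub_zero] at hA
  rw [hA]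
  have hbounds := scan_bounds a ys 0 0
  have hchar := buildM_char a ys 0 0 none (by intro b0 h; cases h)
  have hlen : (buildM 0 0 none ys).length = ys.length := buildM_length ys 0 0 none
  have hiff : ∀ j : Nat, j < (buildM 0 0 none ys).length →
      (((buildM 0 0 none ys).getD j 0 ≥ a) ↔ scanCount a 0 0 ys ≤ (j : Int)) := by
    intro j hj
    rw [hlen] at hj
    constructor
    · intro hge
      by_contra hc
      have := hchar.1 j (by omega)
      omega
    · intro hle
      have hr : scanCount a 0 0 ys < (0 : Int) + ys.length := by omega
      have h2 := hchar.2 hr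
      simp only [sub_zero] at h2
      have hmono := buildM_mono ys 0 0 none (scanCount a 0 0 ys).toNat j
        (by omega) (by omega)
      omega
  have := bsearch_correct ((ys.length : Int) - 0).toNat (buildM 0 0 none ys) a 0
    ((ys.length : Int)) (scanCount a 0 0 ys) (by omega) (by omega) (by omega)
    (by omega) (by rw [hlen]) hiff
  simp only [] at this
  omega
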